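-- pv_equiv track=rewrite | github.com/liorzob20041-coder/professionalsclick | balei-miktzoa-site/app.clean.py | _aggregate_events
-- ===== SOURCE A (Python) =====
-- from collections import defaultdict
--
-- def _aggregate_events(events_iterable):
--     """מקבץ לפי worker_id: views / calls / wa."""
--     per_worker = defaultdict(lambda: {'views': 0, 'calls': 0, 'wa': 0})
--     for e in events_iterable or []:
--         wid = str(e.get('worker_id') or '').strip()
--         ev = str(e.get('event') or '').strip().lower()
--         if not wid:
--             continue
--         if ev == 'view':
--             per_worker[wid]['views'] += 1
--         elif ev in ('click_call', 'call'):
--             per_worker[wid]['calls'] += 1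
--         elif ev in ('click_whatsapp', 'wa'):
--             per_worker[wid]['wa'] += 1
--     return per_worker
-- ===== SOURCE B (Python) =====
-- from collections import defaultdict
--
-- def _norm(e):
--     """Normalize one event to a (worker_id, field) pair, or None if it is skipped."""
--     wid = str(e.get('worker_id') or '').strip()
--     ev = str(e.get('event') or '').strip().lower()
--     if not wid:
--         return None
--     if ev == 'view':
--         return (wid, 'views')
--     if ev in ('click_call', 'call'):
--         return (wid, 'calls')
--     if ev in ('click_whatsapp', 'wa'):
--         return (wid, 'wa')
--     return None
--
-- def _aggregate_events(events_iterable):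
--     # Stage 1: flatten the events into a plain list of (worker_id, field) pairs.
--     pairs = [p for p in map(_norm, events_iterable or []) if p is not None]
--     # Stage 2: for each distinct worker (first-occurrence order), build its row
--     # declaratively by counting its pairs -- no incremental mutation of counters.
--     result = defaultdict(lambda: {'views': 0, 'calls': 0, 'wa': 0})
--     for wid in dict.fromkeys(w for w, _ in pairs):
--         result[wid] = {'views': pairs.count((wid, 'views')),
--                        'calls': pairs.count((wid, 'calls')),
--                        'wa': pairs.count((wid, 'wa'))}
--     return result
-- ===== Notes on version B (the rewrite author's own statement) =====
-- stated objective: alternative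
-- what changed: Replaces A's single pass that increments nested per-worker counter dicts with a staged pipeline: normalize every event into a flat list of (worker_id, field) pairs, then build each distinct worker's row declaratively with three list.count calls -- no incremental counter mutation at all.
import Mathlib
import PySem

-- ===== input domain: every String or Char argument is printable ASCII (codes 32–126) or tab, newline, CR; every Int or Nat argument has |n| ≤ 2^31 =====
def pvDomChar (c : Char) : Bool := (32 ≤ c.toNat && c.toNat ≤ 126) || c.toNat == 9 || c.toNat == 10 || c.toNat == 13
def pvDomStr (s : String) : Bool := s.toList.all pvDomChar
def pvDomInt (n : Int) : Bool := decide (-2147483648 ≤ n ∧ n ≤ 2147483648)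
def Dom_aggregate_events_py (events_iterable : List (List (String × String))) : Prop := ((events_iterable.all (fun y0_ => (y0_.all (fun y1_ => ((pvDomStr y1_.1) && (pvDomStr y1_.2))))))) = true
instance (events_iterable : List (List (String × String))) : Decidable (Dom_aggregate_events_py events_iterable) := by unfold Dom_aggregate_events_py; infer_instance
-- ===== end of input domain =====

-- B replaces A's single-pass nested-counter mutation with a staged pipeline: normalize events to flat (worker, field) pairs, then build each distinct worker's row by counting (alternative decomposition, no speed claim).
set_option maxHeartbeats 1000000


-- ===== PORT A =====
def aggInitA : PySem.Dict String Int := PySem.Dict.ofList [("views", 0), ("calls", 0), ("wa", 0)]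

def aggregate_events_py (events_iterable : List (List (String × String))) : List (String × List (String × Int)) :=
  let per_worker : PySem.Dict String (PySem.Dict String Int) :=
    events_iterable.foldl (fun d e =>
      let wid : String := PySem.Str.strip (((PySem.Dict.ofList e).get? "worker_id").getD "")
      let ev : String := PySem.Str.lower (PySem.Str.strip (((PySem.Dict.ofList e).get? "event").getD ""))
      if wid = "" then d
      else if ev = "view" then d.modify wid aggInitA (fun i => i.modify "views" 0 (· + 1))
      else if ev = "click_call" ∨ ev = "call" then d.modify wid aggInitA (fun i => i.modify "calls" 0 (· + 1))
      else if ev = "click_whatsapp" ∨ ev = "wa" then d.modify wid aggInitA (fun i => i.modify "wa" 0 (· + 1))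
      else d) PySem.Dict.empty
  per_worker.items.map (fun p => (p.1, p.2.items))

-- ===== PORT B =====
-- port of Source B's _norm: some (worker id, tallied field), none = skipped event
def normE (e : List (String × String)) : Option (String × String) :=
  let wid : String := PySem.Str.strip (((PySem.Dict.ofList e).get? "worker_id").getD "")
  let ev : String := PySem.Str.lower (PySem.Str.strip (((PySem.Dict.ofList e).get? "event").getD ""))
  if wid = "" then none
  else if ev = "view" then some (wid, "views")
  else if ev = "click_call" ∨ ev = "call" then some (wid, "calls")
  else if ev = "click_whatsapp" ∨ ev = "wa" then some (wid, "wa")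
  else none

def aggregate_events_py_alt (events_iterable : List (List (String × String))) : List (String × List (String × Int)) :=
  let pairs : List (String × String) := events_iterable.filterMap normE
  (PySem.List.dedup (pairs.map Prod.fst)).map (fun wid =>
    (wid, [("views", (PySem.List.count pairs (wid, "views") : Int)),
           ("calls", (PySem.List.count pairs (wid, "calls") : Int)),
           ("wa", (PySem.List.count pairs (wid, "wa") : Int))]))

-- ===== PRECONDITION & SPEC =====
def Spec_aggregate_events_py (events_iterable : List (List (String × String))) (out : List (String × List (String × Int))) : Prop := out = aggregate_events_py_alt events_iterable
instance (events_iterable : List (List (String × String))) (out : List (String × List (String × Int))) : Decidable (Spec_aggregate_events_py events_iterable out) := by unfold Spec_aggregate_events_py; infer_instance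

-- ===== CLAIM (what is proved, stated in full; the proofs are below) =====
def Claim_equal_aggregate_events_py : Prop := ∀ (events_iterable : List (List (String × String))), Dom_aggregate_events_py events_iterable → Spec_aggregate_events_py events_iterable (aggregate_events_py events_iterable)

-- ===== LEMMAS AND PROOFS =====

def stepA (d : PySem.Dict String (PySem.Dict String Int)) (x : String × String) : PySem.Dict String (PySem.Dict String Int) :=
  d.modify x.1 aggInitA (fun i => i.modify x.2 0 (· + 1))

def innerShape (a b c : Int) : PySem.Dict String Int := PySem.Dict.mk [("views", a), ("calls", b), ("wa", c)]

theorem aggInit_shape : aggInitA = innerShape 0 0 0 := rfl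

theorem normE_snd {e : List (String × String)} {p : String × String} (h : normE e = some p) :
    p.2 = "views" ∨ p.2 = "calls" ∨ p.2 = "wa" := by
  simp only [normE] at h
  split at h
  · exact absurd h (by simp)
  · split at h
    · exact Or.inl (by simpa [eq_comm] using congrArg (Option.map Prod.snd) h)
    · split at h
      · exact Or.inr (Or.inl (by simpa [eq_comm] using congrArg (Option.map Prod.snd) h))
      · split at h
        · exact Or.inr (Or.inr (by simpa [eq_comm] using congrArg (Option.map Prod.snd) h))
        · exact absurd h (by simp)

-- A's per-worker view of its fold: the inner dict of w is a fold over w's fields.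
theorem getD_foldA (xs : List (String × String)) (w : String) :
    ∀ d : PySem.Dict String (PySem.Dict String Int),
    (xs.foldl stepA d).getD w aggInitA
      = ((xs.filter (fun p => p.1 = w)).map Prod.snd).foldl (fun i f => i.modify f 0 (· + 1)) (d.getD w aggInitA) := by
  induction xs with
  | nil => intro d; rfl
  | cons p t ih =>
    intro d
    by_cases hw : p.1 = w
    · have hs : (stepA d p).getD w aggInitA = (d.getD w aggInitA).modify p.2 0 (· + 1) := by
        simp only [stepA]
        rw [PySem.Dict.getD_modify, if_pos hw.symm, hw]
      have hflt : List.filter (fun p => decide (p.1 = w)) (p :: t) = p :: List.filter (fun p => decide (p.1 = w)) t := by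
        simp [List.filter_cons, hw]
      rw [List.foldl_cons, ih, hflt, List.map_cons, List.foldl_cons, hs]
    · have hs : (stepA d p).getD w aggInitA = d.getD w aggInitA := by
        simp only [stepA]
        rw [PySem.Dict.getD_modify, if_neg (fun h => hw h.symm)]
      have hflt : List.filter (fun p => decide (p.1 = w)) (p :: t) = List.filter (fun p => decide (p.1 = w)) t := by
        simp [List.filter_cons, hw]
      rw [List.foldl_cons, ih, hflt, hs]

theorem innerA (fs : List String) (hf : ∀ f ∈ fs, f = "views" ∨ f = "calls" ∨ f = "wa") :
    ∀ a b c : Int, fs.foldl (fun i f => i.modify f 0 (· + 1)) (innerShape a b c)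
      = innerShape (a + fs.count "views") (b + fs.count "calls") (c + fs.count "wa") := by
  induction fs with
  | nil => intro a b c; simp [List.count_nil]
  | cons f t ih =>
    intro a b c
    have ht : ∀ g ∈ t, g = "views" ∨ g = "calls" ∨ g = "wa" := fun g hg => hf g (List.mem_cons_of_mem _ hg)
    rcases hf f List.mem_cons_self with h | h | h <;> subst h
    · rw [List.foldl_cons, show (innerShape a b c).modify "views" 0 (· + 1) = innerShape (a + 1) b c from rfl, ih ht]
      simp only [innerShape, PySem.Dict.mk.injEq, List.cons.injEq, Prod.mk.injEq, List.count_cons, and_true, true_and]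
      refine ⟨?_, ?_, ?_⟩ <;> simp <;> push_cast <;> ring
    · rw [List.foldl_cons, show (innerShape a b c).modify "calls" 0 (· + 1) = innerShape a (b + 1) c from rfl, ih ht]
      simp only [innerShape, PySem.Dict.mk.injEq, List.cons.injEq, Prod.mk.injEq, List.count_cons, and_true, true_and]
      refine ⟨?_, ?_, ?_⟩ <;> simp <;> push_cast <;> ring
    · rw [List.foldl_cons, show (innerShape a b c).modify "wa" 0 (· + 1) = innerShape a b (c + 1) from rfl, ih ht]
      simp only [innerShape, PySem.Dict.mk.injEq, List.cons.injEq, Prod.mk.injEq, List.count_cons, and_true, true_and]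
      refine ⟨?_, ?_, ?_⟩ <;> simp <;> push_cast <;> ring

theorem countFields (xs : List (String × String)) (w f : String) :
    ((xs.filter (fun p => p.1 = w)).map Prod.snd).count f = xs.count (w, f) := by
  induction xs with
  | nil => rfl
  | cons p t ih =>
    by_cases hw : p.1 = w
    · by_cases hf2 : p.2 = f
      · have hp : p = (w, f) := by cases p; simp_all
        simp [List.filter_cons, hw, List.count_cons, hf2, hp, ih]
      · have hp : ¬ p = (w, f) := fun h => hf2 (by rw [h])
        simp [List.filter_cons, hw, List.count_cons, hf2, hp, ih]
    · have hp : ¬ p = (w, f) := fun h => hw (by rw [h])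
      simp [List.filter_cons, hw, List.count_cons, hp, ih]

theorem foldA_eq (l : List (List (String × String))) (d : PySem.Dict String (PySem.Dict String Int)) :
    l.foldl (fun d e =>
      let wid : String := PySem.Str.strip (((PySem.Dict.ofList e).get? "worker_id").getD "")
      let ev : String := PySem.Str.lower (PySem.Str.strip (((PySem.Dict.ofList e).get? "event").getD ""))
      if wid = "" then d
      else if ev = "view" then d.modify wid aggInitA (fun i => i.modify "views" 0 (· + 1))
      else if ev = "click_call" ∨ ev = "call" then d.modify wid aggInitA (fun i => i.modify "calls" 0 (· + 1))
      else if ev = "click_whatsapp" ∨ ev = "wa" then d.modify wid aggInitA (fun i => i.modify "wa" 0 (· + 1))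
      else d) d
    = (l.filterMap normE).foldl stepA d := by
  rw [List.foldl_filterMap]
  congr 1
  funext d e
  simp only [normE, stepA]
  split_ifs <;> rfl

-- A's fold, seen whole: for each distinct worker (first-occurrence order), the row of counts.
theorem A_items (xs : List (String × String)) (hf : ∀ p ∈ xs, p.2 = "views" ∨ p.2 = "calls" ∨ p.2 = "wa") :
    (xs.foldl stepA PySem.Dict.empty).items.map (fun p => (p.1, p.2.items))
      = (PySem.Set.ofList (xs.map Prod.fst)).map (fun w =>
          (w, [("views", (xs.count (w, "views") : Int)),
               ("calls", (xs.count (w, "calls") : Int)),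
               ("wa", (xs.count (w, "wa") : Int))])) := by
  have hA : xs.foldl stepA PySem.Dict.empty
      = xs.foldl (fun d x => d.modify (Prod.fst x) aggInitA ((fun _ x => fun i => PySem.Dict.modify i x.2 0 (· + 1)) d x)) PySem.Dict.empty := rfl
  have ndA : (xs.foldl stepA PySem.Dict.empty).keys.Nodup := by
    rw [hA]; exact PySem.Dict.nodup_keys_foldl_modify_key _ _ _ _ _ PySem.Dict.nodup_keys_empty
  have kA : (xs.foldl stepA PySem.Dict.empty).keys = PySem.Set.ofList (xs.map Prod.fst) := by
    rw [hA, PySem.Dict.keys_foldl_modify_key, PySem.Dict.keys_empty, PySem.Set.update_nil_left]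
  rw [PySem.Dict.items_eq_map_keys _ ndA aggInitA, kA, List.map_map]
  apply List.map_congr_left
  intro w _
  have hL : (xs.foldl stepA PySem.Dict.empty).getD w aggInitA
      = innerShape (xs.count (w, "views")) (xs.count (w, "calls")) (xs.count (w, "wa")) := by
    rw [getD_foldA, PySem.Dict.getD_empty, aggInit_shape,
      innerA _ (fun f hfm => by
        rcases List.mem_map.mp hfm with ⟨p, hpf, rfl⟩
        exact hf p (List.mem_of_mem_filter hpf))]
    rw [countFields, countFields, countFields]
    simp
  simp only [Function.comp_apply, hL]
  rfl

-- ===== VERDICT (by name: the statement is the Claim_ definition above) =====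
theorem aggregate_events_py_spec : Claim_equal_aggregate_events_py := by
  intro events _
  show aggregate_events_py events = aggregate_events_py_alt events
  unfold aggregate_events_py aggregate_events_py_alt
  rw [foldA_eq]
  rw [A_items (events.filterMap normE) (fun p hp => by
    rcases List.mem_filterMap.mp hp with ⟨e, _, hne⟩
    exact normE_snd hne)]
  simp [PySem.List.dedup_eq_ofList, PySem.List.count_eq]
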